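-- pv_equiv track=rewrite | github.com/ndt93/hop-ilp | hop-ilp/src/mrf/spec/mrf_sysadmin.py | count_set_neighbours
-- ===== SOURCE A (Python) =====
-- def count_set_neighbours(clique_bitmask, num_neighbours):
--     bit_pointer = 1 << 3
--     count = 0
--
--     for _ in range(num_neighbours):
--         if clique_bitmask & bit_pointer > 0:
--             count += 1
--         bit_pointer <<= 1
--
--     return count
-- ===== SOURCE B (Python) =====
-- def count_set_neighbours(clique_bitmask, num_neighbours):
--     if num_neighbours <= 0:
--         return 0
--     window = (clique_bitmask >> 3) & ((1 << num_neighbours) - 1)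
--     return bin(window).count('1')
-- ===== Notes on version B (the rewrite author's own statement) =====
-- stated objective: faster
-- what changed: Replaces the per-bit pointer loop with a single shift-and-mask that extracts the whole window at once, then counts its set bits with one popcount (bin().count('1')).
import Mathlib
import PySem

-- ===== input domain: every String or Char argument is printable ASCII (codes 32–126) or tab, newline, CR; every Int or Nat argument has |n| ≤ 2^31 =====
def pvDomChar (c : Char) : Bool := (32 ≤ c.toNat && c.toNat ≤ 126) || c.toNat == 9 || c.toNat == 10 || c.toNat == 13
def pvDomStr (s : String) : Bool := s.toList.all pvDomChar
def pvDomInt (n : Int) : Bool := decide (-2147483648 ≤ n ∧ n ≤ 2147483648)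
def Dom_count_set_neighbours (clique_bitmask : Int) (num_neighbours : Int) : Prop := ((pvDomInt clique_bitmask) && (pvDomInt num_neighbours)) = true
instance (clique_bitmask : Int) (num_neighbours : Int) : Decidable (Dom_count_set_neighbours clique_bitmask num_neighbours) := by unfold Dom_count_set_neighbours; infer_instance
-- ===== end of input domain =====

-- B replaces A's per-bit pointer loop by one shift-and-mask window extraction plus a single popcount.

-- ===== PORT A =====
def count_set_neighbours (clique_bitmask : Int) (num_neighbours : Int) : Int :=
  ((PySem.List.pyRange 0 num_neighbours 1).foldl
      (fun (st : Int × Int) _ =>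
        let count := if Int.land clique_bitmask st.1 > 0 then st.2 + 1 else st.2
        (st.1 <<< (1 : Int), count))
      ((1 : Int) <<< (3 : Int), 0)).2

-- ===== PORT B =====
-- port of Python's int.bit_count / bin(w).count('1') on a nonnegative value
def pvPopcount : Nat → Nat
  | 0 => 0
  | v + 1 => (v + 1) % 2 + pvPopcount ((v + 1) / 2)
decreasing_by exact Nat.div_lt_self (Nat.succ_pos v) one_lt_two

def count_set_neighbours_alt (clique_bitmask : Int) (num_neighbours : Int) : Int :=
  if num_neighbours ≤ 0 then 0
  else
    let window := Int.land (clique_bitmask >>> (3 : Int))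
                           ((1 <<< ((num_neighbours.toNat : Nat) : Int)) - 1)
    (pvPopcount window.toNat : Int)

-- ===== PRECONDITION & SPEC =====
def Spec_count_set_neighbours (clique_bitmask : Int) (num_neighbours : Int) (out : Int) : Prop := out = count_set_neighbours_alt clique_bitmask num_neighbours
instance (clique_bitmask : Int) (num_neighbours : Int) (out : Int) : Decidable (Spec_count_set_neighbours clique_bitmask num_neighbours out) := by unfold Spec_count_set_neighbours; infer_instance

-- ===== CLAIM (what is proved, stated in full; the proofs are below) =====
def Claim_equal_count_set_neighbours : Prop := ∀ (clique_bitmask : Int) (num_neighbours : Int), Dom_count_set_neighbours clique_bitmask num_neighbours → Spec_count_set_neighbours clique_bitmask num_neighbours (count_set_neighbours clique_bitmask num_neighbours)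

-- ===== LEMMAS AND PROOFS =====

-- sum of the bits j, j+1, …, j+k-1 of x, expressed by repeated right shift
def pvBitsum (x : Int) : Nat → Int
  | 0 => 0
  | k + 1 => (if x.testBit 0 then 1 else 0) + pvBitsum (x >>> (1 : Int)) k

theorem pv_testBit_shiftRight (m : Int) (j i : Nat) :
    (m >>> ((j : Nat) : Int)).testBit i = m.testBit (j + i) := by
  cases m with
  | ofNat a =>
      rw [show ((Int.ofNat a) : Int) = ((a : Nat) : Int) from rfl, Int.shiftRight_natCast]
      simp [Int.testBit, Nat.testBit_shiftRight]
  | negSucc a =>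
      rw [Int.shiftRight_negSucc]
      simp [Int.testBit, Nat.testBit_shiftRight]

theorem pv_land_two_pow_pos_iff (m : Int) (j : Nat) :
    (0 < Int.land m ((2 ^ j : Nat) : Int)) ↔ m.testBit j = true := by
  have hp : (0 : Int) < ((2 ^ j : Nat) : Int) := by exact_mod_cast Nat.two_pow_pos j
  cases m with
  | ofNat a =>
      have h : Int.land (Int.ofNat a) ((2 ^ j : Nat) : Int) = ((a &&& 2 ^ j : Nat) : Int) := rfl
      have ht : (Int.ofNat a).testBit j = a.testBit j := rfl
      rw [h, ht, Nat.and_two_pow]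
      cases hb : a.testBit j
      · simp
      · simp only [Bool.toNat_true, one_mul]
        simp
  | negSucc a =>
      have h : Int.land (Int.negSucc a) ((2 ^ j : Nat) : Int) = ((Nat.ldiff (2 ^ j) a : Nat) : Int) := rfl
      have ht : (Int.negSucc a).testBit j = !a.testBit j := rfl
      have hld : Nat.ldiff (2 ^ j) a = if a.testBit j then 0 else 2 ^ j := by
        apply Nat.eq_of_testBit_eq
        intro i
        rw [Nat.testBit_ldiff, Nat.testBit_two_pow]
        by_cases hji : j = i
        · subst hji; cases hb : a.testBit j <;> simp
        · cases hb : a.testBit j <;> simp [hji]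
      rw [h, ht, hld]
      cases hb : a.testBit j
      · simp only [if_neg Bool.false_ne_true]
        simp
      · simp

theorem pv_foldA (m : Int) : ∀ (l : List Int) (j : Nat) (c : Int),
    (l.foldl
        (fun (st : Int × Int) _ =>
          let count := if Int.land m st.1 > 0 then st.2 + 1 else st.2
          (st.1 <<< (1 : Int), count))
        (((2 ^ j : Nat) : Int), c)).2
      = c + pvBitsum (m >>> ((j : Nat) : Int)) l.length := by
  intro l
  induction l with
  | nil => intro j c; simp [pvBitsum]
  | cons a t ih =>
      intro j c
      have hbp : ((2 ^ j : Nat) : Int) <<< (1 : Int) = ((2 ^ (j + 1) : Nat) : Int) := by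
        rw [show ((1 : Int)) = ((1 : Nat) : Int) from rfl, Int.shiftLeft_natCast]
        norm_num [Nat.shiftLeft_eq, pow_succ]
      have hsh : (m >>> ((j : Nat) : Int)) >>> (1 : Int) = m >>> (((j + 1 : Nat)) : Int) := by
        rw [show ((1 : Int)) = ((1 : Nat) : Int) from rfl, ← Int.shiftRight_add']
        norm_num
      have hbit : (m >>> ((j : Nat) : Int)).testBit 0 = m.testBit j := by
        rw [pv_testBit_shiftRight]; simp
      have hcond := pv_land_two_pow_pos_iff m j
      simp only [List.foldl_cons, hbp]
      rw [ih (j + 1)]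
      simp only [List.length_cons, pvBitsum, hbit, hsh]
      by_cases hb : m.testBit j = true
      · rw [if_pos (hcond.mpr hb), if_pos hb]; ring
      · rw [if_neg (fun hpos => hb (hcond.mp hpos)), if_neg hb]; ring

theorem pv_window_testBit (x : Int) (k i : Nat) :
    ((Int.land x (((2 ^ k : Nat) : Int) - 1)).toNat).testBit i
      = (decide (i < k) && x.testBit i) := by
  have hm : (((2 ^ k : Nat) : Int) - 1) = ((2 ^ k - 1 : Nat) : Int) := by
    have h1 : (1 : Nat) ≤ 2 ^ k := Nat.one_le_two_pow
    push_cast [h1]; ring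
  rw [hm]
  cases x with
  | ofNat a =>
      have h : Int.land (Int.ofNat a) ((2 ^ k - 1 : Nat) : Int) = Int.ofNat (a &&& 2 ^ k - 1) := rfl
      rw [h, Nat.and_two_pow_sub_one_eq_mod]
      have h2 : (Int.ofNat (a % 2 ^ k)).toNat = a % 2 ^ k := rfl
      rw [h2, Nat.testBit_mod_two_pow]
      rfl
  | negSucc a =>
      have h : Int.land (Int.negSucc a) ((2 ^ k - 1 : Nat) : Int)
          = Int.ofNat (Nat.ldiff (2 ^ k - 1) a) := rfl
      rw [h]
      have h2 : (Int.ofNat (Nat.ldiff (2 ^ k - 1) a)).toNat = Nat.ldiff (2 ^ k - 1) a := rfl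
      rw [h2, Nat.testBit_ldiff, Nat.testBit_two_pow_sub_one]
      rfl

theorem pvPopcount_eq (u : Nat) : pvPopcount u = u % 2 + pvPopcount (u / 2) := by
  cases u <;> simp [pvPopcount]

theorem pv_popcount_window : ∀ (k : Nat) (x : Int),
    ((pvPopcount ((Int.land x (((2 ^ k : Nat) : Int) - 1)).toNat) : Nat) : Int) = pvBitsum x k := by
  intro k
  induction k with
  | zero =>
      intro x
      have h0 : (Int.land x (((2 ^ 0 : Nat) : Int) - 1)).toNat = 0 := by
        apply Nat.eq_of_testBit_eq
        intro i
        rw [pv_window_testBit]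
        simp
      rw [h0]
      simp [pvPopcount, pvBitsum]
  | succ k ih =>
      intro x
      obtain ⟨u, hu⟩ : ∃ u, (Int.land x (((2 ^ (k + 1) : Nat) : Int) - 1)).toNat = u := ⟨_, rfl⟩
      have hmod : u % 2 = if x.testBit 0 then 1 else 0 := by
        have hbit0 : u.testBit 0 = x.testBit 0 := by
          rw [← hu, pv_window_testBit]; simp
        have h2 := Nat.testBit_zero u
        rw [hbit0] at h2
        have hlt : u % 2 < 2 := Nat.mod_lt u (by norm_num)
        cases hb : x.testBit 0 <;> rw [hb] at h2 <;> simp at h2 <;> simp <;> omega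
      have hdiv : u / 2 = (Int.land (x >>> ((1 : Nat) : Int)) (((2 ^ k : Nat) : Int) - 1)).toNat := by
        apply Nat.eq_of_testBit_eq
        intro i
        rw [Nat.testBit_div_two, ← hu, pv_window_testBit, pv_window_testBit,
          pv_testBit_shiftRight]
        have h1 : (i + 1 < k + 1) ↔ (i < k) := by omega
        have h2 : x.testBit (i + 1) = x.testBit (1 + i) := by rw [Nat.add_comm]
        rw [h2]
        simp [h1]
      rw [hu, pvPopcount_eq, Nat.cast_add, hdiv, ih (x >>> ((1 : Nat) : Int)), hmod]
      have h3 : (x >>> ((1 : Nat) : Int)) = (x >>> (1 : Int)) := rfl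
      rw [h3]
      show _ = pvBitsum x (k + 1)
      simp only [pvBitsum]
      cases hbx : x.testBit 0 <;> simp

-- ===== VERDICT (by name: the statement is the Claim_ definition above) =====
theorem count_set_neighbours_spec : Claim_equal_count_set_neighbours := by
  intro m n _
  unfold Spec_count_set_neighbours count_set_neighbours count_set_neighbours_alt
  by_cases hn : n ≤ 0
  · have hlen : (0 : Int) ≤ 0 := le_refl 0
    have : PySem.List.pyRange 0 n 1 = [] := by
      rw [PySem.List.pyRange_one]
      have : (n - 0).toNat = 0 := by omega
      rw [this]; rfl
    rw [this, if_pos hn]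
    rfl
  · rw [if_neg hn]
    have hinit : ((1 : Int) <<< (3 : Int)) = ((2 ^ 3 : Nat) : Int) := by decide
    rw [hinit, pv_foldA]
    have hmask : (1 : Int) <<< ((n.toNat : Nat) : Int) = ((2 ^ n.toNat : Nat) : Int) :=
      Int.one_shiftLeft n.toNat
    rw [hmask, pv_popcount_window]
    have hlen : (PySem.List.pyRange 0 n 1).length = n.toNat := by
      rw [PySem.List.length_pyRange_one]; omega
    rw [hlen]
    norm_num
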